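-- pv_equiv track=rewrite | github.com/p-lots/codewars | 7-kyu/encode-data-on-cd-(compact-disc)-surface/python/solution.py | encode_cd
-- ===== SOURCE A (Python) =====
-- def encode_cd(n):
--     n_bin = f'{n:08b}'[::-1]
--     encoded = 'P'
--     for digit in n_bin:
--         if digit == '1':
--             encoded += 'L' if encoded[-1] == 'P' else 'P'
--         else:
--             encoded += encoded[-1]
--     return encoded
-- ===== SOURCE B (Python) =====
-- def encode_cd(n):
--     s = f'{n:08b}'[::-1]
--     return ''.join('L' if s[:i].count('1') % 2 else 'P' for i in range(len(s) + 1))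
-- ===== Notes on version B (the rewrite author's own statement) =====
-- stated objective: simpler
-- what changed: Replaces A's imperative loop that repeatedly toggles or copies the last character of a growing string with a single join over a closed per-position formula: the character at position i is determined by the parity of the number of set bits among the first i reversed formatted digits (prefix popcount parity).
import Mathlib
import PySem

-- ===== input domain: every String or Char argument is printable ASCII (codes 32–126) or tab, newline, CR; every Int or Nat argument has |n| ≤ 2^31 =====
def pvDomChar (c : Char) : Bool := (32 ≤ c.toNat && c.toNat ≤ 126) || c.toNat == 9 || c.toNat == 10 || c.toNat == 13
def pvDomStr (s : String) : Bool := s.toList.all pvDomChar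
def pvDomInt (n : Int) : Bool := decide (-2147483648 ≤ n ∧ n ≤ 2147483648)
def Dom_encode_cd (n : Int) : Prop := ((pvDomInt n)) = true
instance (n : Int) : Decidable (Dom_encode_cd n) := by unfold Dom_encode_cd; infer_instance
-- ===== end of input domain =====

-- B replaces A's imperative last-character-toggle loop by a per-position prefix
-- popcount-parity formula (objective: simpler decomposition; no speed claim).


-- ===== PORT A =====
-- shared helper: Python's f'{n:08b}' — minus sign for negative n, binary digits of |n|,
-- zero-padded to total width 8 (exact for all Int)
def pyBin8 (n : Int) : List Char :=
  let digits := Nat.toDigits 2 n.natAbs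
  if n < 0 then '-' :: (List.replicate (7 - digits.length) '0' ++ digits)
  else List.replicate (8 - digits.length) '0' ++ digits

-- one step of A's loop body (encoded += …, toggling on '1')
def stepA (enc : List Char) (digit : Char) : List Char :=
  if digit = '1' then enc ++ [if enc.getLastD 'P' = 'P' then 'L' else 'P']
  else enc ++ [enc.getLastD 'P']

def encode_cd (n : Int) : String :=
  let n_bin := (pyBin8 n).reverse
  String.mk (n_bin.foldl stepA ['P'])

-- ===== PORT B =====
def encode_cd_alt (n : Int) : String :=
  let s := (pyBin8 n).reverse
  String.mk ((List.range (s.length + 1)).map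
    (fun i => if (s.take i).count '1' % 2 = 1 then 'L' else 'P'))

-- ===== PRECONDITION & SPEC =====
def Spec_encode_cd (n : Int) (out : String) : Prop := out = encode_cd_alt n
instance (n : Int) (out : String) : Decidable (Spec_encode_cd n out) := by unfold Spec_encode_cd; infer_instance

-- ===== CLAIM (what is proved, stated in full; the proofs are below) =====
def Claim_equal_encode_cd : Prop := ∀ (n : Int), Dom_encode_cd n → Spec_encode_cd n (encode_cd n)

-- ===== LEMMAS AND PROOFS =====

lemma fold_eq (s : List Char) :
    s.foldl stepA ['P'] =
      (List.range (s.length + 1)).map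
        (fun i => if (s.take i).count '1' % 2 = 1 then 'L' else 'P') := by
  induction s using List.reverseRecOn with
  | nil => decide
  | append_singleton l c ih =>
    rw [List.foldl_append, ih]
    simp only [List.foldl_cons, List.foldl_nil]
    have hlast :
        ((List.range (l.length + 1)).map
          (fun i => if (l.take i).count '1' % 2 = 1 then 'L' else 'P')).getLastD 'P'
          = (if l.count '1' % 2 = 1 then 'L' else 'P') := by
      rw [List.range_succ, List.map_append]
      simp
    have hcongr : ∀ i ∈ List.range (l.length + 1),
        (if ((l ++ [c]).take i).count '1' % 2 = 1 then 'L' else 'P')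
          = (if (l.take i).count '1' % 2 = 1 then 'L' else 'P') := by
      intro i hi
      rw [List.mem_range] at hi
      rw [List.take_append_of_le_length (by omega)]
    rw [show (l ++ [c]).length = l.length + 1 by simp]
    rw [List.range_succ (n := l.length + 1), List.map_append,
        List.map_congr_left hcongr]
    unfold stepA
    rw [hlast]
    have htake : ((l ++ [c]).take (l.length + 1)) = l ++ [c] := by
      simp
    simp only [List.map_cons, List.map_nil]
    rw [htake]
    by_cases hc : c = '1'
    · subst hc
      simp only [if_pos rfl]
      have : (l ++ ['1']).count '1' = l.count '1' + 1 := by simp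
      rw [this]
      rcases Nat.mod_two_eq_zero_or_one (l.count '1') with h | h <;>
        simp [h, Nat.add_mod]
    · have hcnt : (l ++ [c]).count '1' = l.count '1' := by
        simp [hc]
      rw [if_neg hc, hcnt]

-- ===== VERDICT (by name: the statement is the Claim_ definition above) =====
theorem encode_cd_spec : Claim_equal_encode_cd := by
  intro n _
  unfold Spec_encode_cd encode_cd encode_cd_alt
  simp only [fold_eq]
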